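-- pv_equiv track=rewrite | github.com/lucifer666/Programming101-Tasks-Completion | Week1/1.Warmups/hack_numbers.py | next_hack
-- ===== SOURCE A (Python) =====
-- def next_hack(n):
--     is_hack_number = False
--     n += 1
--     while(is_hack_number == False):
--         if (bin(n)[2:] == bin(n)[2:][::-1]) and (bin(n)[2:].count('1') % 2 != 0):
--             is_hack_number = True
--             return n
--         n += 1
-- ===== SOURCE B (Python) =====
-- def _rev_bits(x, k):
--     r = 0
--     for _ in range(k):
--         r = 2 * r + (x & 1)
--         x >>= 1
--     return r
--
-- def next_hack(n):
--     m = n + 1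
--     if m < 1:
--         m = 1
--     k = (m.bit_length()) // 2
--     while True:
--         h = max(m >> k, 1 << k) | 1
--         while h < (2 << k):
--             p = (h << k) | _rev_bits(h >> 1, k)
--             if p >= m:
--                 return p
--             h += 2
--         k += 1
-- ===== Notes on version B (the rewrite author's own statement) =====
-- stated objective: faster
-- what changed: Instead of scanning every integer above n and string-testing bin(m) for palindromicity and an odd 1-count, B constructs the answer directly: a hack number is exactly a binary palindrome of odd bit-length 2k+1 whose middle bit is set (even-length palindromes always have an even 1-count), so B derives the candidate half from the top bits of the threshold, reverses k bits arithmetically, and returns the first constructed palindrome at or above the threshold after at most a couple of candidates per bit-length.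
import Mathlib
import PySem

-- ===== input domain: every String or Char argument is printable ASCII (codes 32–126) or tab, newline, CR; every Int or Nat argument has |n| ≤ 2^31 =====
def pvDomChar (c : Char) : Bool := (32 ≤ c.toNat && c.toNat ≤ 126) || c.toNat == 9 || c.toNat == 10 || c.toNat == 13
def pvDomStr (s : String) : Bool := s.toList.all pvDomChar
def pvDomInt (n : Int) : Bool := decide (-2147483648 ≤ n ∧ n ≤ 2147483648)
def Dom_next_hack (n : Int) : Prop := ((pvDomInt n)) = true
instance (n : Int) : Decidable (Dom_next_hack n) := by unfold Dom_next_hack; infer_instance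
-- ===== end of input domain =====

-- B replaces A's one-by-one scan (string palindrome + odd 1-count test per integer) by direct
-- construction of the next binary palindrome with odd 1-count from its half bits (objective: faster).

-- ===== PORT A =====
-- the loop body's condition, verbatim: bin(n)[2:] == bin(n)[2:][::-1] and bin(n)[2:].count('1') % 2 != 0
def next_hackCond (n : Int) : Bool :=
  (PySem.List.slice (PySem.Int.toBinChars0b n) (some 2) none ==
     ((PySem.List.slice? (PySem.List.slice (PySem.Int.toBinChars0b n) (some 2) none) none none (-1)).getD []))
  && (PySem.Chars.count (PySem.List.slice (PySem.Int.toBinChars0b n) (some 2) none) ['1'] % 2 != 0)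

-- the 'while' loop; fuel only makes the recursion total, it is proved never to run out
def next_hackGo : Nat → Int → Int
  | 0, n => n
  | fuel+1, n => if next_hackCond n then n else next_hackGo fuel (n + 1)

def next_hack (n : Int) : Int :=
  next_hackGo ((1 - (n + 1)).toNat + 4 * (n + 1).toNat + 8) (n + 1)

-- ===== PORT B =====
-- r = 0; for _ in range(k): r = 2*r + (x & 1); x >>= 1; return r   (k is a bit count, hence Nat)
def rev_bits (x : Int) (k : Nat) : Int :=
  ((PySem.List.pyRange 0 (k : Int) 1).foldl
    (fun (st : Int × Int) _ => (2 * st.1 + PySem.Int.band st.2 1, st.2 >>> 1)) (0, x)).1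

-- inner 'while h < (2 << k)' loop of B
def next_hackAltInner (m : Int) (k : Nat) (h : Int) : Option Int :=
  if hlt : h < (2 : Int) <<< k then
    let p := PySem.Int.bor (h <<< k) (rev_bits (h >>> 1) k)
    if m ≤ p then some p else next_hackAltInner m k (h + 2)
  else none
termination_by (((2 : Int) <<< k) - h).toNat
decreasing_by omega

-- outer 'while True' loop of B; fuel only makes it total, it is proved never to run out
def next_hackAltOuter : Nat → Int → Nat → Int
  | 0, _, _ => 0
  | fuel+1, m, k =>
    match next_hackAltInner m k (PySem.Int.bor (max (m >>> k) ((1 : Int) <<< k)) 1) with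
    | some p => p
    | none => next_hackAltOuter fuel m (k + 1)

def next_hack_alt (n : Int) : Int :=
  let m0 := n + 1
  let m := if m0 < 1 then 1 else m0
  next_hackAltOuter (PySem.Int.bitLength m + 2) m (PySem.Int.bitLength m / 2)

-- ===== PRECONDITION & SPEC =====
def Spec_next_hack (n : Int) (out : Int) : Prop := out = next_hack_alt n
instance (n : Int) (out : Int) : Decidable (Spec_next_hack n out) := by unfold Spec_next_hack; infer_instance

-- ===== CLAIM (what is proved, stated in full; the proofs are below) =====
def Claim_equal_next_hack : Prop := ∀ (n : Int), Dom_next_hack n → Spec_next_hack n (next_hack n)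

-- ===== LEMMAS AND PROOFS =====

-- ---- Nat-level model: binary digits LSB-first ----
def bitChar (b : Bool) : Char := if b then '1' else '0'

def bitsL (n : Nat) : List Bool :=
  if h : n = 0 then [] else (n % 2 == 1) :: bitsL (n / 2)
termination_by n
decreasing_by exact Nat.div_lt_self (Nat.pos_of_ne_zero h) one_lt_two

def LN (n : Nat) : Nat := (bitsL n).length
def cnt (n : Nat) : Nat := (bitsL n).count true
def PalN (n : Nat) : Prop := bitsL n = (bitsL n).reverse
def HackN (q : Nat) : Prop := 1 ≤ q ∧ PalN q ∧ cnt q % 2 = 1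

def revN : Nat → Nat → Nat
  | 0, _ => 0
  | k+1, x => 2 * revN k x + (if x.testBit k then 1 else 0)

def PN (k h : Nat) : Nat := h * 2 ^ k + revN k (h / 2)

def IsLeastHackGE (M q : Nat) : Prop := HackN q ∧ M ≤ q ∧ ∀ q', HackN q' → M ≤ q' → q ≤ q'

-- ---- basic bitsL facts ----
lemma bitsL_zero : bitsL 0 = [] := by rw [bitsL]; simp

lemma bitsL_pos {n : Nat} (h : 0 < n) : bitsL n = (n % 2 == 1) :: bitsL (n / 2) := by
  rw [bitsL]; simp [h.ne']

lemma LN_zero : LN 0 = 0 := by simp [LN, bitsL_zero]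

lemma LN_pos_eq {n : Nat} (h : 0 < n) : LN n = LN (n / 2) + 1 := by
  simp [LN, bitsL_pos h]

lemma lt_two_pow_LN (n : Nat) : n < 2 ^ LN n := by
  induction n using Nat.strong_induction_on with
  | _ n ih =>
    rcases Nat.eq_zero_or_pos n with h | h
    · subst h; simp [LN_zero]
    · have h2 := ih (n / 2) (Nat.div_lt_self h one_lt_two)
      rw [LN_pos_eq h, pow_succ]
      omega

lemma two_pow_LN_le {n : Nat} (h : 0 < n) : 2 ^ (LN n - 1) ≤ n := by
  induction n using Nat.strong_induction_on with
  | _ n ih =>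
    rcases Nat.lt_or_ge n 2 with h2 | h2
    · have h1 : n = 1 := by omega
      subst h1
      simp [LN_pos_eq one_pos, LN_zero]
    · have hpos : 0 < n / 2 := by omega
      have h3 := ih (n / 2) (Nat.div_lt_self h one_lt_two) hpos
      obtain ⟨j, hj⟩ : ∃ j, LN (n / 2) = j + 1 := ⟨LN (n / 2) - 1, by rw [LN_pos_eq hpos]; omega⟩
      rw [LN_pos_eq h, hj]
      rw [hj] at h3
      simp only [Nat.add_sub_cancel] at h3 ⊢
      rw [pow_succ]
      omega

lemma LN_pos {n : Nat} (h : 0 < n) : 0 < LN n := by rw [LN_pos_eq h]; omega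

lemma LN_eq_of_bounds {n L : Nat} (hlo : 2 ^ L ≤ n) (hhi : n < 2 ^ (L + 1)) : LN n = L + 1 := by
  have h0 : 0 < n := lt_of_lt_of_le (Nat.two_pow_pos L) hlo
  have h1 := lt_two_pow_LN n
  have h2 := two_pow_LN_le h0
  have h3 : L < LN n := by
    by_contra hc
    exact absurd (lt_of_le_of_lt hlo h1) (not_lt.mpr (Nat.pow_le_pow_right (by omega) (by omega)))
  have h4 : LN n - 1 < L + 1 := by
    by_contra hc
    exact absurd (lt_of_le_of_lt h2 hhi) (not_lt.mpr (Nat.pow_le_pow_right (by omega) (by omega)))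
  omega

lemma getElem_bitsL {n i : Nat} (h : i < LN n) : (bitsL n)[i]'(h) = n.testBit i := by
  induction n using Nat.strong_induction_on generalizing i with
  | _ n ih =>
    rcases Nat.eq_zero_or_pos n with h0 | h0
    · subst h0; simp [LN_zero] at h
    · have hb := bitsL_pos h0
      rcases i with _ | i
      · simp only [LN] at h ⊢
        rw [List.getElem_of_eq hb]
        rcases Nat.mod_two_eq_zero_or_one n with h2 | h2 <;>
          · simp [Nat.testBit_zero, h2]
      · have hlt : i < LN (n / 2) := by
          rw [LN_pos_eq h0] at h; omega
        have := ih (n / 2) (Nat.div_lt_self h0 one_lt_two) hlt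
        simp only [LN] at h ⊢
        rw [List.getElem_of_eq hb]
        simpa [Nat.testBit_add_one] using this

lemma cnt_zero : cnt 0 = 0 := by simp [cnt, bitsL_zero]

lemma cnt_pos {n : Nat} (h : 0 < n) : cnt n = n % 2 + cnt (n / 2) := by
  simp only [cnt, bitsL_pos h, List.count_cons]
  rcases Nat.mod_two_eq_zero_or_one n with h2 | h2 <;> simp [h2] <;> omega
lemma PalN_iff {n : Nat} (h : 0 < n) :
    PalN n ↔ ∀ i, i < LN n → n.testBit i = n.testBit (LN n - 1 - i) := by
  unfold PalN
  constructor
  · intro hp i hi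
    have h2 : LN n - 1 - i < LN n := by omega
    have := congrArg (fun l => l[i]?) hp
    simp only [List.getElem?_reverse (by simpa [LN] using hi)] at this
    rw [List.getElem?_eq_getElem (by simpa [LN] using hi),
        List.getElem?_eq_getElem (by simpa [LN] using h2)] at this
    have e1 := getElem_bitsL hi
    have e2 := getElem_bitsL h2
    simp only [LN] at e1 e2 hi h2
    rw [e1, e2] at this
    exact Option.some_injective _ this
  · intro hp
    apply List.ext_getElem (by simp)
    intro i h1 h2
    have hi : i < LN n := by simpa [LN] using h1
    have h3 : LN n - 1 - i < LN n := by omega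
    rw [List.getElem_reverse]
    exact (getElem_bitsL hi).trans ((hp i hi).trans (getElem_bitsL h3).symm)
lemma bitLength_eq_LN (n : Nat) : PySem.Int.bitLength (n : Int) = LN n := by
  induction n using Nat.strong_induction_on with
  | _ n ih =>
    rcases Nat.eq_zero_or_pos n with h | h
    · subst h
      simp [LN_zero, PySem.Int.bitLength_zero]
    · rw [PySem.Int.bitLength_natCast h, ih (n / 2) (Nat.div_lt_self h one_lt_two),
          LN_pos_eq h]
-- ---- string bridge (A's condition ↔ HackN) ----
lemma toDigitsCore_eq : ∀ (f n : Nat) (rest : List Char), 0 < n → n ≤ f →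
    Nat.toDigitsCore 2 f n rest = ((bitsL n).map bitChar).reverse ++ rest := by
  intro f
  induction f with
  | zero => intro n rest h1 h2; omega
  | succ f ih =>
    intro n rest h1 h2
    rcases Nat.lt_or_ge n 2 with hn | hn
    · have : n = 1 := by omega
      subst this
      simp [Nat.toDigitsCore, bitsL_pos one_pos, bitsL_zero, bitChar, Nat.digitChar]
    · have hd : ¬ (n / 2 = 0) := by omega
      rw [Nat.toDigitsCore]
      simp only [hd, if_false]
      rw [ih (n / 2) _ (by omega) (by omega)]
      rw [bitsL_pos h1]
      simp only [List.map_cons, List.reverse_cons, List.append_assoc]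
      congr 1
      rcases Nat.mod_two_eq_zero_or_one n with h2 | h2 <;> simp [h2, bitChar, Nat.digitChar]
lemma toDigits_eq {n : Nat} (h : 0 < n) :
    Nat.toDigits 2 n = ((bitsL n).map bitChar).reverse := by
  unfold Nat.toDigits
  rw [toDigitsCore_eq (n + 1) n [] h (by omega)]
  simp
lemma count_go_singleton (c : Char) : ∀ (fuel : Nat) (s : List Char) (acc : Nat), s.length ≤ fuel →
    PySem.Chars.count.go [c] fuel s acc = acc + s.count c := by
  intro fuel
  induction fuel with
  | zero =>
    intro s acc h
    have : s = [] := by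
      cases s with
      | nil => rfl
      | cons a t => simp at h
    subst this
    simp [PySem.Chars.count.go]
  | succ f ih =>
    intro s acc h
    cases s with
    | nil => simp [PySem.Chars.count.go]
    | cons a t =>
      rw [PySem.Chars.count.go]
      by_cases hc : c = a
      · subst hc
        have hp : [c].isPrefixOf (c :: t) = true := by simp [List.isPrefixOf]
        simp only [hp, if_true, List.length_cons, List.length_nil, List.drop_succ_cons,
          List.drop_zero]
        rw [ih t (acc + 1) (by simpa using h)]
        simp only [List.count_cons, BEq.rfl, if_true]
        omega
      · have hp : [c].isPrefixOf (a :: t) = false := by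
          simp [List.isPrefixOf]
          exact fun hh => absurd hh hc
        simp only [hp, Bool.false_eq_true, if_false]
        rw [ih t acc (by simpa using h)]
        simp only [List.count_cons]
        have : ¬ (a == c) := by simp; exact fun hh => absurd hh.symm hc
        simp [this]
lemma count_singleton (s : List Char) (c : Char) : PySem.Chars.count s [c] = s.count c := by
  unfold PySem.Chars.count
  simp only [List.isEmpty_cons, Bool.false_eq_true, if_false]
  rw [count_go_singleton c s.length s 0 le_rfl]
  omega
lemma bitChar_inj : Function.Injective bitChar := by
  intro a b h
  cases a <;> cases b <;> simp [bitChar] at h ⊢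

lemma bitChar_ne_b (b : Bool) : bitChar b ≠ 'b' := by
  cases b <;> decide

lemma next_hackCond_iff (n : Int) : next_hackCond n = true ↔ 0 < n ∧ HackN n.toNat := by
  rcases lt_trichotomy n 0 with hn | hn | hn
  · constructor
    · intro hc
      exfalso
      unfold next_hackCond at hc
      rw [PySem.List.slice_from _ (by omega : (0:Int) ≤ 2),
          PySem.List.slice?_none_none_neg_one] at hc
      simp only [Option.getD_some, Bool.and_eq_true, beq_iff_eq] at hc
      obtain ⟨h1, -⟩ := hc
      have hq : 0 < n.natAbs := by omega
      rw [show PySem.Int.toBinChars0b n = '-' :: '0' :: 'b' :: Nat.toDigits 2 n.natAbs from by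
            simp [PySem.Int.toBinChars0b, hn]] at h1
      rw [toDigits_eq hq, bitsL_pos hq] at h1
      simp only [Int.toNat_of_nonneg, List.map_cons, List.reverse_cons] at h1
      rw [show (2:Int).toNat = 2 from rfl] at h1
      simp only [List.drop_succ_cons, List.drop_zero] at h1
      rw [show 'b' :: (((bitsL (n.natAbs / 2)).map bitChar).reverse ++
              [bitChar (n.natAbs % 2 == 1)])
            = ('b' :: ((bitsL (n.natAbs / 2)).map bitChar).reverse) ++
              [bitChar (n.natAbs % 2 == 1)] from by simp] at h1
      have e := congrArg (fun l => l[0]?) h1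
      simp only [List.reverse_append, List.reverse_cons, List.reverse_nil, List.nil_append,
        List.getElem?_cons_zero, List.cons_append, List.nil_append] at e
      exact absurd (Option.some_injective _ e).symm (bitChar_ne_b _)
    · rintro ⟨h, -⟩; omega
  · subst hn
    constructor
    · intro hc
      have : next_hackCond 0 = false := by decide
      rw [this] at hc
      exact absurd hc (by simp)
    · rintro ⟨h, -⟩; omega
  · have hq : 0 < n.toNat := by omega
    unfold next_hackCond
    rw [PySem.List.slice_from _ (by omega : (0:Int) ≤ 2),
        PySem.List.slice?_none_none_neg_one]
    rw [show PySem.Int.toBinChars0b n = '0' :: 'b' :: Nat.toDigits 2 n.toNat from by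
          simp [PySem.Int.toBinChars0b, not_lt.mpr (le_of_lt hn)]]
    rw [show (2:Int).toNat = 2 from rfl]
    simp only [Option.getD_some, List.drop_succ_cons, List.drop_zero]
    rw [toDigits_eq hq, count_singleton]
    simp only [List.reverse_reverse, Bool.and_eq_true, beq_iff_eq, bne_iff_ne]
    have hpal : ((bitsL n.toNat).map bitChar).reverse = (bitsL n.toNat).map bitChar
        ↔ PalN n.toNat := by
      unfold PalN
      rw [← List.map_reverse]
      constructor
      · intro h
        exact (List.map_injective_iff.mpr bitChar_inj h).symm
      · intro h
        rw [← h]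
    have hcnt : (((bitsL n.toNat).map bitChar).reverse).count '1' = cnt n.toNat := by
      rw [List.count_reverse, show '1' = bitChar true from rfl,
          List.count_map_of_injective _ bitChar bitChar_inj]
      rfl
    rw [hpal, hcnt]
    unfold HackN
    constructor
    · rintro ⟨h1, h2⟩
      exact ⟨hn, by omega, h1, by omega⟩
    · rintro ⟨-, -, h1, h2⟩
      exact ⟨h1, by omega⟩

-- ---- revN / PN construction facts ----
lemma revN_lt (k x : Nat) : revN k x < 2 ^ k := by
  induction k with
  | zero => simp [revN]
  | succ k ih =>
    have : (if x.testBit k then 1 else 0) ≤ 1 := by split <;> omega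
    simp only [revN, pow_succ]
    omega
lemma testBit_revN (k x i : Nat) :
    (revN k x).testBit i = (decide (i < k) && x.testBit (k - 1 - i)) := by
  induction k generalizing i with
  | zero => simp [revN]
  | succ k ih =>
    rcases i with _ | i
    · simp only [revN]
      cases hx : x.testBit k <;>
        simp [hx, Nat.testBit_zero, Nat.mul_add_mod, Nat.add_sub_cancel]
    · have hdiv : (2 * revN k x + (if x.testBit k then 1 else 0)) / 2 = revN k x := by
        split <;> omega
      simp only [revN, Nat.testBit_add_one, hdiv, ih i]
      have : k + 1 - 1 - (i + 1) = k - 1 - i := by omega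
      rw [this]
      by_cases hik : i < k
      · simp [hik]
      · simp [hik, show ¬ (i + 1 < k + 1) from by omega]
lemma testBit_split {k b : Nat} (a i : Nat) (hb : b < 2 ^ k) :
    (a * 2 ^ k + b).testBit i = if i < k then b.testBit i else a.testBit (i - k) := by
  by_cases hik : i < k
  · rw [if_pos hik]
    rw [Nat.testBit_eq_decide_div_mod_eq, Nat.testBit_eq_decide_div_mod_eq]
    have e1 : 2 ^ k = 2 ^ (k - i - 1) * 2 * 2 ^ i := by
      rw [mul_assoc, ← pow_succ']
      rw [← pow_add]
      congr 1
      omega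
    have e2 : a * 2 ^ k + b = (a * 2 ^ (k - i - 1) * 2) * 2 ^ i + b := by
      rw [e1]; ring
    rw [e2]
    have e3 : (a * 2 ^ (k - i - 1) * 2 * 2 ^ i + b) / 2 ^ i
        = b / 2 ^ i + a * 2 ^ (k - i - 1) * 2 := by
      rw [Nat.add_comm, Nat.add_mul_div_right _ _ (Nat.two_pow_pos i)]
    rw [e3, Nat.add_mul_mod_self_right]
  · rw [if_neg hik]
    rw [Nat.testBit_eq_decide_div_mod_eq, Nat.testBit_eq_decide_div_mod_eq]
    have e1 : (a * 2 ^ k + b) / 2 ^ i = a / 2 ^ (i - k) := by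
      have e2 : (2:Nat) ^ i = 2 ^ k * 2 ^ (i - k) := by
        rw [← pow_add]; congr 1; omega
      rw [e2, ← Nat.div_div_eq_div_mul]
      congr 1
      rw [Nat.add_comm, Nat.add_mul_div_right _ _ (Nat.two_pow_pos k),
          Nat.div_eq_of_lt hb]
      omega
    rw [e1]
lemma cnt_split {k b : Nat} (a : Nat) (hb : b < 2 ^ k) :
    cnt (a * 2 ^ k + b) = cnt a + cnt b := by
  induction k generalizing a b with
  | zero =>
    have : b = 0 := by omega
    subst this
    simp [cnt_zero]
  | succ k ih =>
    rcases Nat.eq_zero_or_pos (a * 2 ^ (k + 1) + b) with h0 | h0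
    · have ha : a = 0 := by
        rcases Nat.eq_zero_or_pos a with h | h
        · exact h
        · exfalso; have := Nat.two_pow_pos (k+1); nlinarith
      have hb0 : b = 0 := by omega
      subst ha; subst hb0
      simp [cnt_zero]
    · rw [cnt_pos h0]
      have hu : a * 2 ^ (k + 1) + b = 2 * (a * 2 ^ k) + b := by ring
      have hmod : (a * 2 ^ (k + 1) + b) % 2 = b % 2 := by omega
      have hdiv : (a * 2 ^ (k + 1) + b) / 2 = a * 2 ^ k + b / 2 := by omega
      rw [hmod, hdiv, ih a (by
        have := Nat.pow_lt_pow_succ (a := 2) (n := k)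
        omega)]
      rcases Nat.eq_zero_or_pos b with hb0 | hb0
      · subst hb0; simp [cnt_zero]
      · rw [cnt_pos hb0]; omega
lemma cnt_bit (b : Nat) (hb : b ≤ 1) : cnt b = b := by
  interval_cases b
  · exact cnt_zero
  · rw [cnt_pos one_pos]; simp [cnt_zero]

lemma cnt_revN (k x : Nat) : cnt (revN k x) = cnt (x % 2 ^ k) := by
  induction k with
  | zero => simp [revN, Nat.mod_one]
  | succ k ih =>
    have hbit : (if x.testBit k then 1 else 0) ≤ 1 := by split <;> omega
    have e1 : revN (k + 1) x = (revN k x) * 2 ^ 1 + (if x.testBit k then 1 else 0) := by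
      simp only [revN]; ring
    rw [e1, cnt_split _ (by simpa using by omega : (if x.testBit k then 1 else 0) < 2 ^ 1)]
    rw [cnt_bit _ hbit, ih]
    have e2 : x % 2 ^ (k + 1) = (x / 2 ^ k % 2) * 2 ^ k + x % 2 ^ k := by
      rw [Nat.mod_pow_succ]
      ring_nf
    rw [e2, cnt_split _ (by exact Nat.mod_lt _ (Nat.two_pow_pos k))]
    rw [cnt_bit _ (by omega : x / 2 ^ k % 2 ≤ 1)]
    rw [Nat.testBit_eq_decide_div_mod_eq]
    rcases Nat.mod_two_eq_zero_or_one (x / 2 ^ k) with h | h <;> simp [h] <;> omega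
lemma lor_split {k b : Nat} (a : Nat) (hb : b < 2 ^ k) : (a <<< k) ||| b = a * 2 ^ k + b := by
  apply Nat.eq_of_testBit_eq
  intro i
  rw [Nat.testBit_or, Nat.testBit_shiftLeft, testBit_split a i hb]
  by_cases hik : i < k
  · simp [hik, show ¬ (i ≥ k) from by omega]
  · have hbf : b.testBit i = false := Nat.testBit_lt_two_pow (lt_of_lt_of_le hb
      (Nat.pow_le_pow_right (by omega) (by omega)))
    simp [hik, show i ≥ k from by omega, hbf]
lemma lor_one (a : Nat) : a ||| 1 = 2 * (a / 2) + 1 := by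
  apply Nat.eq_of_testBit_eq
  intro i
  rcases i with _ | i
  · simp [Nat.testBit_zero, Nat.mul_add_mod]
  · have h2 : (2 * (a / 2) + 1) / 2 = a / 2 := by omega
    rw [show (2 * (a / 2) + 1).testBit (i+1) = ((2 * (a / 2) + 1)/2).testBit i from
          Nat.testBit_add_one _ _, h2,
        show (a ||| 1).testBit (i+1) = (a.testBit (i+1) || (1:Nat).testBit (i+1)) from
          Nat.testBit_or .., Nat.testBit_add_one a i]
    simp [show ((1:Nat)).testBit (i+1) = false from by simp [Nat.testBit_add_one]]

lemma PN_lower {k h : Nat} (hlo : 2 ^ k ≤ h) : 2 ^ (2 * k) ≤ PN k h := by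
  unfold PN
  have e : (2:Nat) ^ (2 * k) = 2 ^ k * 2 ^ k := by
    rw [← pow_add]; congr 1; omega
  have := Nat.mul_le_mul_right (2 ^ k) hlo
  omega
lemma PN_upper {k h : Nat} (hhi : h < 2 ^ (k + 1)) : PN k h < 2 ^ (2 * k + 1) := by
  unfold PN
  have h1 := revN_lt k (h / 2)
  have h2 : (h + 1) * 2 ^ k ≤ 2 ^ (k + 1) * 2 ^ k := Nat.mul_le_mul_right _ (by omega)
  have e : (2:Nat) ^ (k + 1) * 2 ^ k = 2 ^ (2 * k + 1) := by
    rw [← pow_add]; congr 1; omega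
  nlinarith
lemma LN_PN {k h : Nat} (hlo : 2 ^ k ≤ h) (hhi : h < 2 ^ (k + 1)) : LN (PN k h) = 2 * k + 1 := by
  exact LN_eq_of_bounds (PN_lower hlo) (PN_upper hhi)
lemma testBit_PN (k h i : Nat) :
    (PN k h).testBit i = if i < k then (h / 2).testBit (k - 1 - i) else h.testBit (i - k) := by
  unfold PN
  rw [testBit_split h i (revN_lt k (h / 2))]
  by_cases hik : i < k
  · simp [hik, testBit_revN]
  · simp [hik]
lemma hack_PN {k h : Nat} (hodd : h % 2 = 1) (hlo : 2 ^ k ≤ h) (hhi : h < 2 ^ (k + 1)) :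
    HackN (PN k h) := by
  have hpos : 0 < PN k h := lt_of_lt_of_le (Nat.two_pow_pos (2 * k)) (PN_lower hlo)
  have hL := LN_PN hlo hhi
  refine ⟨hpos, ?_, ?_⟩
  · rw [PalN_iff hpos, hL]
    intro i hi
    rw [testBit_PN, testBit_PN]
    have e1 : 2 * k + 1 - 1 - i = 2 * k - i := by omega
    rw [e1]
    rcases lt_trichotomy i k with hik | hik | hik
    · rw [if_pos hik, if_neg (by omega)]
      rw [show (h / 2).testBit (k - 1 - i) = h.testBit (k - 1 - i + 1) from
            (Nat.testBit_add_one h (k - 1 - i)).symm]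
      congr 1
      omega
    · subst hik
      rw [if_neg (by omega), if_neg (by omega)]
      congr 1
      omega
    · rw [if_neg (by omega), if_pos (by omega)]
      rw [show (h / 2).testBit (k - 1 - (2 * k - i)) = h.testBit (k - 1 - (2 * k - i) + 1) from
            (Nat.testBit_add_one h _).symm]
      congr 1
      omega
  · have e1 : cnt (PN k h) = cnt h + cnt (revN k (h / 2)) := cnt_split h (revN_lt k (h / 2))
    have hh2 : h / 2 < 2 ^ k := by
      have : (2:Nat) ^ (k + 1) = 2 * 2 ^ k := by rw [pow_succ]; ring
      omega
    have e2 : cnt (revN k (h / 2)) = cnt (h / 2) := by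
      rw [cnt_revN, Nat.mod_eq_of_lt hh2]
    have e3 : cnt h = 1 + cnt (h / 2) := by
      rw [cnt_pos (by omega), hodd]
    omega
lemma PN_lt_PN {k h h' : Nat} (hh : h < h') : PN k h < PN k h' := by
  unfold PN
  have h1 := revN_lt k (h / 2)
  have h2 : (h + 1) * 2 ^ k ≤ h' * 2 ^ k := Nat.mul_le_mul_right _ (by omega)
  nlinarith

-- ---- completeness: every hack number is some PN ----
lemma testBit_div_pow (q k j : Nat) : (q / 2 ^ k).testBit j = q.testBit (j + k) := by
  rw [Nat.testBit_eq_decide_div_mod_eq, Nat.testBit_eq_decide_div_mod_eq,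
      Nat.div_div_eq_div_mul, ← pow_add, Nat.add_comm k j]

lemma LN_odd_of_hack {q : Nat} (hq : HackN q) : LN q % 2 = 1 := by
  obtain ⟨hq1, hq2, hq3⟩ := hq
  by_contra hodd
  have hL : LN q % 2 = 0 := by omega
  obtain ⟨k, hk⟩ : ∃ k, LN q = 2 * k := ⟨LN q / 2, by omega⟩
  have hkpos : 0 < k := by
    have := LN_pos hq1
    omega
  have hpal := (PalN_iff hq1).mp hq2
  have hmod : q % 2 ^ k = revN k (q / 2 ^ k) := by
    apply Nat.eq_of_testBit_eq
    intro i
    rw [Nat.testBit_mod_two_pow, testBit_revN]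
    by_cases hik : i < k
    · simp only [hik, decide_true, Bool.true_and]
      rw [hpal i (by omega), hk]
      rw [testBit_div_pow]
      congr 1
      omega
    · simp [hik]
  have hdivlt : q / 2 ^ k < 2 ^ k := by
    have h1 := lt_two_pow_LN q
    rw [hk] at h1
    have e : (2:Nat) ^ (2 * k) = 2 ^ k * 2 ^ k := by rw [← pow_add]; congr 1; omega
    exact Nat.div_lt_of_lt_mul (by omega)
  have e1 : q = (q / 2 ^ k) * 2 ^ k + q % 2 ^ k := by
    rw [Nat.mul_comm]
    exact (Nat.div_add_mod q (2 ^ k)).symm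
  have e2 : cnt q = cnt (q / 2 ^ k) + cnt (q % 2 ^ k) := by
    conv_lhs => rw [e1]
    exact cnt_split _ (Nat.mod_lt _ (Nat.two_pow_pos k))
  rw [hmod, cnt_revN, Nat.mod_eq_of_lt hdivlt] at e2
  omega
lemma hack_decomp {q : Nat} (hq : HackN q) :
    (q / 2 ^ (LN q / 2)) % 2 = 1 ∧ 2 ^ (LN q / 2) ≤ q / 2 ^ (LN q / 2) ∧
    q / 2 ^ (LN q / 2) < 2 ^ (LN q / 2 + 1) ∧ q = PN (LN q / 2) (q / 2 ^ (LN q / 2)) := by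
  obtain ⟨hq1, hq2, hq3⟩ := hq
  have hodd := LN_odd_of_hack ⟨hq1, hq2, hq3⟩
  set k := LN q / 2 with hk
  have hL : LN q = 2 * k + 1 := by omega
  set h := q / 2 ^ k with hh
  have hpal := (PalN_iff hq1).mp hq2
  have hqlt : q < 2 ^ (2 * k + 1) := by
    have := lt_two_pow_LN q
    rwa [hL] at this
  have hqge : 2 ^ (2 * k) ≤ q := by
    have := two_pow_LN_le hq1
    rw [hL] at this
    simpa using this
  have hhlo : 2 ^ k ≤ h := by
    rw [hh]
    apply Nat.le_div_iff_mul_le (Nat.two_pow_pos k) |>.mpr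
    have e : (2:Nat) ^ k * 2 ^ k = 2 ^ (2 * k) := by rw [← pow_add]; congr 1; omega
    omega
  have hhhi : h < 2 ^ (k + 1) := by
    rw [hh]
    apply Nat.div_lt_of_lt_mul
    have e : (2:Nat) ^ k * 2 ^ (k + 1) = 2 ^ (2 * k + 1) := by rw [← pow_add]; congr 1; omega
    omega
  have hmod : q % 2 ^ k = revN k (h / 2) := by
    apply Nat.eq_of_testBit_eq
    intro i
    rw [Nat.testBit_mod_two_pow, testBit_revN]
    by_cases hik : i < k
    · simp only [hik, decide_true, Bool.true_and]
      rw [hpal i (by omega), hL]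
      have e1 : 2 * k + 1 - 1 - i = (k - 1 - i + 1) + k := by omega
      rw [e1, ← testBit_div_pow, ← hh, Nat.testBit_add_one]
    · simp [hik]
  have e1 : q = h * 2 ^ k + q % 2 ^ k := by
    rw [hh, Nat.mul_comm]
    exact (Nat.div_add_mod q (2 ^ k)).symm
  have hcnt : cnt q = cnt h + cnt (h / 2) := by
    rw [show cnt q = cnt (h * 2 ^ k + q % 2 ^ k) from by rw [← e1],
        cnt_split _ (Nat.mod_lt _ (Nat.two_pow_pos k)), hmod, cnt_revN,
        Nat.mod_eq_of_lt (by
          have : (2:Nat) ^ (k + 1) = 2 * 2 ^ k := by rw [pow_succ]; ring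
          omega)]
  have hodd2 : h % 2 = 1 := by
    have e2 : cnt h = h % 2 + cnt (h / 2) := cnt_pos (by
      have := Nat.two_pow_pos k
      omega)
    rcases Nat.mod_two_eq_zero_or_one h with h0 | h0
    · exfalso
      rw [e2, h0] at hcnt
      omega
    · exact h0
  refine ⟨hodd2, hhlo, hhhi, ?_⟩
  rw [e1, PN, hmod]

-- ---- existence of hack numbers ----
lemma cnt_ones (n : Nat) : cnt (2 ^ n - 1) = n := by
  induction n with
  | zero => simp [cnt_zero]
  | succ n ih =>
    have h1 : (2:Nat) ^ (n + 1) = 2 * 2 ^ n := by rw [pow_succ]; ring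
    have h2 : (0:Nat) < 2 ^ n := Nat.two_pow_pos n
    have h3 : 0 < 2 ^ (n + 1) - 1 := by omega
    rw [cnt_pos h3]
    have h4 : (2 ^ (n + 1) - 1) % 2 = 1 := by omega
    have h5 : (2 ^ (n + 1) - 1) / 2 = 2 ^ n - 1 := by omega
    rw [h4, h5, ih]
    omega

lemma hack_all_ones (k : Nat) : HackN (2 ^ (2 * k + 1) - 1) := by
  have h2 : (0:Nat) < 2 ^ (2 * k + 1) := Nat.two_pow_pos _
  have hpos : 0 < 2 ^ (2 * k + 1) - 1 := by
    have : (2:Nat) ^ (2 * k + 1) ≥ 2 ^ 1 := Nat.pow_le_pow_right (by omega) (by omega)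
    have : (2:Nat) ^ 1 = 2 := by norm_num
    omega
  have hL : LN (2 ^ (2 * k + 1) - 1) = 2 * k + 1 := by
    apply LN_eq_of_bounds
    · have h3 : (2:Nat) ^ (2 * k + 1) = 2 * 2 ^ (2 * k) := by rw [pow_succ]; ring
      have h4 : (0:Nat) < 2 ^ (2 * k) := Nat.two_pow_pos _
      omega
    · omega
  refine ⟨hpos, ?_, ?_⟩
  · rw [PalN_iff hpos, hL]
    intro i hi
    rw [Nat.testBit_two_pow_sub_one, Nat.testBit_two_pow_sub_one]
    simp [hi, show 2 * k + 1 - 1 - i < 2 * k + 1 from by omega]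
  · rw [cnt_ones]
    omega
lemma exists_hack_ge {m : Nat} (hm : 1 ≤ m) : ∃ q, HackN q ∧ m ≤ q ∧ q ≤ 4 * m := by
  set L := LN m with hLdef
  have hLpos : 0 < L := LN_pos hm
  set k := L / 2 with hk
  refine ⟨2 ^ (2 * k + 1) - 1, hack_all_ones k, ?_, ?_⟩
  · have h1 : m < 2 ^ L := lt_two_pow_LN m
    have h2 : (2:Nat) ^ L ≤ 2 ^ (2 * k + 1) := Nat.pow_le_pow_right (by omega) (by omega)
    omega
  · have h1 : 2 ^ (L - 1) ≤ m := two_pow_LN_le hm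
    have h2 : (2:Nat) ^ (2 * k + 1) ≤ 2 ^ (L + 1) := Nat.pow_le_pow_right (by omega) (by omega)
    have h3 : (2:Nat) ^ (L + 1) = 4 * 2 ^ (L - 1) := by
      rw [show L + 1 = (L - 1) + 2 from by omega, pow_add]
      ring
    omega

-- ---- A's loop computes the least hack ≥ n+1 ----
lemma goA_spec : ∀ (f : Nat) (m : Int) (q : Nat), HackN q → m ≤ (q : Int) →
    (∀ q', HackN q' → m ≤ (q' : Int) → q ≤ q') → ((q : Int) - m).toNat < f →
    next_hackGo f m = (q : Int) := by
  intro f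
  induction f with
  | zero => intro m q _ h2 _ h4; omega
  | succ f ih =>
    intro m q h1 h2 h3 h4
    by_cases hc : next_hackCond m
    · rw [next_hackGo, if_pos hc]
      obtain ⟨hm0, hmh⟩ := (next_hackCond_iff m).mp hc
      have := h3 m.toNat hmh (by omega)
      omega
    · rw [next_hackGo, if_neg hc]
      have hne : (q : Int) ≠ m := by
        intro he
        exact hc ((next_hackCond_iff m).mpr ⟨by have := h1.1; omega, by
          rw [← he]; simpa using h1⟩)
      apply ih (m + 1) q h1 (by omega)
      · intro q' hq1 hq2
        exact h3 q' hq1 (by omega)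
      · omega

-- ---- B's loops compute the least hack ≥ m ----
lemma rev_bits_fold (k : Nat) : ∀ (r x : Nat),
    ((PySem.List.pyRange 0 (k : Int) 1).foldl
      (fun (st : Int × Int) _ => (2 * st.1 + PySem.Int.band st.2 1, st.2 >>> 1))
      ((r : Int), (x : Int)))
    = (((r * 2 ^ k + revN k x : Nat) : Int), ((x >>> k : Nat) : Int)) := by
  induction k with
  | zero =>
    intro r x
    rw [show ((0:Nat) : Int) = 0 from rfl]
    rw [show PySem.List.pyRange 0 0 1 = [] from by decide]
    simp [revN]
  | succ k ih =>
    intro r x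
    rw [show ((k+1:Nat) : Int) = (k : Int) + 1 from by push_cast; ring,
        PySem.List.pyRange_one_succ_right (by positivity), List.foldl_append, ih r x]
    simp only [List.foldl_cons, List.foldl_nil]
    have hband : PySem.Int.band ((x >>> k : Nat) : Int) 1 = (((x >>> k) % 2 : Nat) : Int) := by
      rw [show (1:Int) = ((1:Nat):Int) from rfl, PySem.Int.band_natCast]
      simp [Nat.and_one_is_mod]
    rw [hband, Prod.mk.injEq]
    refine ⟨?_, ?_⟩
    · show 2 * ((r * 2 ^ k + revN k x : Nat) : Int) + (((x >>> k) % 2 : Nat) : Int)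
        = (((r * 2 ^ (k+1) + revN (k+1) x : Nat) : Int))
      have hb : (x >>> k) % 2 = if x.testBit k then 1 else 0 := by
        rw [Nat.testBit_eq_decide_div_mod_eq, Nat.shiftRight_eq_div_pow]
        rcases Nat.mod_two_eq_zero_or_one (x / 2 ^ k) with h | h <;> simp [h]
      rw [hb]
      push_cast
      simp only [revN]
      split <;> push_cast <;> ring
    · show ((x >>> k : Nat) : Int) >>> (1:Int) = ((x >>> (k+1) : Nat) : Int)
      rw [show ((x >>> k : Nat) : Int) >>> (1:Int) = ((x >>> k >>> 1 : Nat) : Int) from rfl]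
      congr 1

lemma rev_bits_eq (x : Nat) (k : Nat) : rev_bits (x : Int) k = ((revN k x : Nat) : Int) := by
  unfold rev_bits
  have h := rev_bits_fold k 0 x
  push_cast at h
  rw [h]
  simp

lemma two_shl_eq (k : Nat) : ((2 : Int) <<< k) = ((2 ^ (k + 1) : Nat) : Int) := by
  rw [show (2:Int) <<< k = (((2:Nat) <<< k : Nat) : Int) from rfl]
  congr 1
  rw [Nat.shiftLeft_eq, pow_succ]
  ring

lemma p_cast (k H : Nat) :
    PySem.Int.bor (((H : Int)) <<< k) (rev_bits ((H : Int) >>> 1) k) = ((PN k H : Nat) : Int) := by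
  rw [show ((H : Int)) <<< k = ((H <<< k : Nat) : Int) from rfl,
      show ((H : Int)) >>> (1:Int) = ((H >>> 1 : Nat) : Int) from rfl,
      rev_bits_eq, PySem.Int.bor_natCast]
  congr 1
  rw [lor_split _ (revN_lt k (H >>> 1)), PN, Nat.shiftRight_eq_div_pow, pow_one]

lemma inner_none (k : Nat) (M H : Nat) (hstop : 2 ^ (k + 1) ≤ H)
    (hINV : ∀ q, HackN q → M ≤ q → 2 * k + 1 ≤ LN q)
    (hHalf : ∀ q, HackN q → M ≤ q → LN q = 2 * k + 1 → H ≤ q / 2 ^ k) :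
    next_hackAltInner (M : Int) k (H : Int) = none ∧
      ∀ q, HackN q → M ≤ q → 2 * (k + 1) + 1 ≤ LN q := by
  constructor
  · rw [next_hackAltInner, dif_neg (by rw [two_shl_eq]; exact_mod_cast not_lt.mpr hstop)]
  · intro q h1 h2
    have h3 := hINV q h1 h2
    have h4 := LN_odd_of_hack h1
    rcases Nat.lt_or_ge (LN q) (2 * k + 2) with h5 | h5
    · exfalso
      have h6 : LN q = 2 * k + 1 := by omega
      have h7 := hHalf q h1 h2 h6
      have h8 := (hack_decomp h1).2.2.1
      rw [show LN q / 2 = k from by omega] at h8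
      omega
    · omega

lemma inner_spec_aux (k : Nat) (M : Nat) : ∀ (t : Nat) (H : Nat), 2 ^ (k + 1) - H ≤ t →
    H % 2 = 1 → 2 ^ k ≤ H →
    (∀ q, HackN q → M ≤ q → 2 * k + 1 ≤ LN q) →
    (∀ q, HackN q → M ≤ q → LN q = 2 * k + 1 → H ≤ q / 2 ^ k) →
    (∃ p : Nat, next_hackAltInner (M : Int) k (H : Int) = some (p : Int) ∧ IsLeastHackGE M p) ∨
    (next_hackAltInner (M : Int) k (H : Int) = none ∧
      ∀ q, HackN q → M ≤ q → 2 * (k + 1) + 1 ≤ LN q) := by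
  intro t
  induction t with
  | zero =>
    intro H ht hH hHlo hINV hHalf
    exact Or.inr (inner_none k M H (by omega) hINV hHalf)
  | succ t ih =>
    intro H ht hH hHlo hINV hHalf
    rcases Nat.lt_or_ge H (2 ^ (k + 1)) with hlt | hstop
    · rw [next_hackAltInner, dif_pos (by rw [two_shl_eq]; exact_mod_cast hlt)]
      simp only [p_cast k H]
      have hhack : HackN (PN k H) := hack_PN hH hHlo hlt
      by_cases hge : (M : Int) ≤ ((PN k H : Nat) : Int)
      · rw [if_pos hge]
        left
        refine ⟨PN k H, rfl, hhack, by exact_mod_cast hge, ?_⟩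
        intro q h1 h2
        have h3 := hINV q h1 h2
        rcases Nat.lt_or_ge (LN q) (2 * k + 2) with h5 | h5
        · have h6 : LN q = 2 * k + 1 := by omega
          have h7 := hHalf q h1 h2 h6
          have hd := hack_decomp h1
          rw [show LN q / 2 = k from by omega] at hd
          rcases Nat.eq_or_lt_of_le h7 with he | hlt2
          · rw [hd.2.2.2, ← he]
          · exact le_of_lt (calc PN k H < PN k (q / 2 ^ k) := PN_lt_PN hlt2
              _ = q := hd.2.2.2.symm)
        · have h6 : 2 ^ (2 * k + 1) ≤ q := by
            have := two_pow_LN_le h1.1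
            calc (2:Nat) ^ (2 * k + 1) ≤ 2 ^ (LN q - 1) :=
                  Nat.pow_le_pow_right (by omega) (by omega)
              _ ≤ q := this
          have := PN_upper hlt
          omega
      · rw [if_neg hge]
        have hlt2 : PN k H < M := by
          rcases Nat.lt_or_ge (PN k H) M with h | h
          · exact h
          · exact absurd (by exact_mod_cast h : (M : Int) ≤ ((PN k H : Nat) : Int)) hge
        have hcast : (H : Int) + 2 = ((H + 2 : Nat) : Int) := by push_cast; ring
        rw [hcast]
        apply ih (H + 2) (by omega) (by omega) (by omega) hINV
        intro q h1 h2 h6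
        have h7 := hHalf q h1 h2 h6
        have hd := hack_decomp h1
        rw [show LN q / 2 = k from by omega] at hd
        have hqodd : (q / 2 ^ k) % 2 = 1 := hd.1
        have hne : q / 2 ^ k ≠ H := by
          intro he
          rw [hd.2.2.2, he] at h2
          omega
        omega
    · exact Or.inr (inner_none k M H hstop hINV hHalf)

lemma inner_spec (k : Nat) (M H : Nat) (hH : H % 2 = 1) (hHlo : 2 ^ k ≤ H)
    (hINV : ∀ q, HackN q → M ≤ q → 2 * k + 1 ≤ LN q)
    (hHalf : ∀ q, HackN q → M ≤ q → LN q = 2 * k + 1 → H ≤ q / 2 ^ k) :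
    (∃ p : Nat, next_hackAltInner (M : Int) k (H : Int) = some (p : Int) ∧ IsLeastHackGE M p) ∨
    (next_hackAltInner (M : Int) k (H : Int) = none ∧
      ∀ q, HackN q → M ≤ q → 2 * (k + 1) + 1 ≤ LN q) :=
  inner_spec_aux k M (2 ^ (k + 1) - H) H le_rfl hH hHlo hINV hHalf

lemma h0_cast (M : Nat) (k : Nat) :
    PySem.Int.bor (max ((M : Int) >>> k) ((1 : Int) <<< k)) 1
      = (((max (M / 2 ^ k) (2 ^ k) ||| 1 : Nat)) : Int) := by
  rw [show ((M : Int)) >>> k = ((M >>> k : Nat) : Int) from rfl,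
      show ((1 : Int)) <<< k = ((1 <<< k : Nat) : Int) from rfl,
      ← Nat.cast_max,
      show (1:Int) = ((1:Nat) : Int) from rfl, PySem.Int.bor_natCast]
  rw [Nat.shiftRight_eq_div_pow, Nat.shiftLeft_eq, one_mul]

lemma outer_spec : ∀ (fuel : Nat) (k : Nat) (M : Nat), 1 ≤ M →
    (∀ q, HackN q → M ≤ q → 2 * k + 1 ≤ LN q) →
    (∃ q, HackN q ∧ M ≤ q ∧ LN q ≤ 2 * (k + fuel) - 1) →
    ∃ p : Nat, next_hackAltOuter fuel (M : Int) k = (p : Int) ∧ IsLeastHackGE M p := by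
  intro fuel
  induction fuel with
  | zero =>
    intro k M hM hINV hex
    obtain ⟨q, h1, h2, h3⟩ := hex
    have := hINV q h1 h2
    omega
  | succ fuel ih =>
    intro k M hM hINV hex
    set A := max (M / 2 ^ k) (2 ^ k) with hA
    set H0 := A ||| 1 with hH0
    have hlor := lor_one A
    have hH0odd : H0 % 2 = 1 := by omega
    have hAk : 2 ^ k ≤ A := le_max_right _ _
    have hH0lo : 2 ^ k ≤ H0 := by omega
    have hHalf : ∀ q, HackN q → M ≤ q → LN q = 2 * k + 1 → H0 ≤ q / 2 ^ k := by
      intro q h1 h2 h3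
      have hd := hack_decomp h1
      rw [show LN q / 2 = k from by omega] at hd
      have hodd := hd.1
      have hge1 : 2 ^ k ≤ q / 2 ^ k := hd.2.1
      have hge2 : M / 2 ^ k ≤ q / 2 ^ k := Nat.div_le_div_right h2
      have hgeA : A ≤ q / 2 ^ k := by omega
      omega
    rcases inner_spec k M H0 hH0odd hH0lo hINV hHalf with ⟨p, hsome, hleast⟩ | ⟨hnone, hINV'⟩
    · refine ⟨p, ?_, hleast⟩
      rw [next_hackAltOuter, h0_cast M k, ← hA, ← hH0, hsome]
    · rw [next_hackAltOuter, h0_cast M k, ← hA, ← hH0, hnone]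
      apply ih (k + 1) M hM hINV'
      obtain ⟨q, h1, h2, h3⟩ := hex
      exact ⟨q, h1, h2, by omega⟩

-- ---- glue ----
lemma least_unique {M q q' : Nat} (h1 : IsLeastHackGE M q) (h2 : IsLeastHackGE M q') : q = q' :=
  le_antisymm (h1.2.2 q' h2.1 h2.2.1) (h2.2.2 q h1.1 h1.2.1)

lemma next_hack_eq_least (n : Int) (q : Nat)
    (hq : IsLeastHackGE (if n + 1 < 1 then 1 else (n + 1).toNat) q) :
    next_hack n = (q : Int) := by
  obtain ⟨hhack, hge, hmin⟩ := hq
  have hq1 : 1 ≤ q := hhack.1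
  have hgeI : n + 1 ≤ (q : Int) := by
    split at hge <;> omega
  have hminI : ∀ q', HackN q' → n + 1 ≤ (q' : Int) → q ≤ q' := by
    intro q' h1 h2
    apply hmin q' h1
    have := h1.1
    split <;> omega
  -- bound q via an explicit hack number above the threshold
  have hM : 1 ≤ (if n + 1 < 1 then 1 else (n + 1).toNat) := by split <;> omega
  obtain ⟨qw, hw1, hw2, hw3⟩ := exists_hack_ge hM
  have hqle : q ≤ qw := hmin qw hw1 hw2
  unfold next_hack
  apply goA_spec _ (n + 1) q hhack hgeI hminI
  split at hw3 <;> omega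

lemma LN_le_of_le {a b : Nat} (ha : 0 < a) (h : a ≤ b) : LN a ≤ LN b := by
  have h1 := two_pow_LN_le ha
  have h2 := lt_two_pow_LN b
  by_contra hc
  have : 2 ^ LN b ≤ 2 ^ (LN a - 1) := Nat.pow_le_pow_right (by omega) (by omega)
  omega

lemma next_hack_alt_eq_least (n : Int) (q : Nat)
    (hq : IsLeastHackGE (if n + 1 < 1 then 1 else (n + 1).toNat) q) :
    next_hack_alt n = (q : Int) := by
  set M := (if n + 1 < 1 then 1 else (n + 1).toNat) with hM
  have hM1 : 1 ≤ M := by rw [hM]; split <;> omega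
  have hcast : (if n + 1 < 1 then (1 : Int) else n + 1) = ((M : Nat) : Int) := by
    rw [hM]
    split <;> simp <;> omega
  unfold next_hack_alt
  simp only []
  rw [hcast, bitLength_eq_LN M]
  have hINV : ∀ q', HackN q' → M ≤ q' → 2 * (LN M / 2) + 1 ≤ LN q' := by
    intro q' h1 h2
    have hle := LN_le_of_le hM1 h2
    have hodd := LN_odd_of_hack h1
    have : LN M / 2 * 2 ≤ LN M := Nat.div_mul_le_self _ _
    omega
  obtain ⟨qw, hw1, hw2, hw3⟩ := exists_hack_ge hM1
  have hwLN : LN qw ≤ LN M + 2 := by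
    have h1 : qw < 2 ^ (LN M + 2) := by
      have h2 : M < 2 ^ LN M := lt_two_pow_LN M
      have h3 : (2:Nat) ^ (LN M + 2) = 4 * 2 ^ LN M := by rw [pow_add]; ring
      omega
    have h4 := two_pow_LN_le hw1.1
    by_contra hc
    have : 2 ^ (LN M + 2) ≤ 2 ^ (LN qw - 1) := Nat.pow_le_pow_right (by omega) (by omega)
    omega
  obtain ⟨p, hp, hleast⟩ := outer_spec (LN M + 2) (LN M / 2) M hM1 hINV
    ⟨qw, hw1, hw2, by
      have : LN M / 2 * 2 + 1 ≥ LN M := by omega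
      omega⟩
  rw [hp]
  congr 1
  exact least_unique hleast hq

-- ===== VERDICT (by name: the statement is the Claim_ definition above) =====
theorem next_hack_spec : Claim_equal_next_hack := by
  intro n _
  unfold Spec_next_hack
  set M := (if n + 1 < 1 then 1 else (n + 1).toNat) with hM
  have hM1 : 1 ≤ M := by rw [hM]; split <;> omega
  obtain ⟨qw, hw1, hw2, hw3⟩ := exists_hack_ge hM1
  haveI : DecidablePred (fun q => HackN q ∧ M ≤ q) := Classical.decPred _
  have hex : ∃ q, HackN q ∧ M ≤ q := ⟨qw, hw1, hw2⟩
  set q := Nat.find hex with hqdef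
  have hspec := Nat.find_spec hex
  have hleast : IsLeastHackGE M q :=
    ⟨hspec.1, hspec.2, fun q' h1 h2 => Nat.find_min' hex ⟨h1, h2⟩⟩
  rw [next_hack_eq_least n q hleast, next_hack_alt_eq_least n q hleast]
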